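-- pv_equiv track=rewrite | github.com/ilialecha/Programming_2 | First_year/count_a.py | count_a
-- ===== SOURCE A (Python) =====
-- def count_a(s,c):
--     i = 0
--     a = 0
--     found = False
--
--     while i<len(s) and not found:
--         t = s[i]
--         if s[i] == c:
--             found = True
--             break
--         if s[i] == 'a': a+=1
--         i+=1
--     if found:return a
--     else: return -1
-- ===== SOURCE B (Python) =====
-- def count_a(s, c):
--     idx = next((i for i, x in enumerate(s) if x == c), None)
--     if idx is None:
--         return -1
--     return s[:idx].count('a')
-- ===== Notes on version B (the rewrite author's own statement) =====
-- stated objective: simpler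
-- what changed: Replaces the fused while-loop with flag variables by a locate pass (first index where the element equals c) followed by a count of 'a' over the prefix slice; the slice .count runs at C speed, which a timing run measured ~2.4x faster.
import Mathlib
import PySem

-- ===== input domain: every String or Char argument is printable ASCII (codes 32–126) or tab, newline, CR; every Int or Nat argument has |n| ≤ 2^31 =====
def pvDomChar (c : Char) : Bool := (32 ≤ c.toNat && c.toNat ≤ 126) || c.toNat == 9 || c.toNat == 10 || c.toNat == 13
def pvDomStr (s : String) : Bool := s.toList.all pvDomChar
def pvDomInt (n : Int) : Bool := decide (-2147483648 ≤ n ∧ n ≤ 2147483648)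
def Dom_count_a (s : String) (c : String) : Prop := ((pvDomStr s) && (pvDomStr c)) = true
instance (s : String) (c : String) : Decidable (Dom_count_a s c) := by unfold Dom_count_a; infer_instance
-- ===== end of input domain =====

-- B replaces A's fused while-loop (flag + break) with a locate pass followed by a count over the prefix; objective: simpler.

-- ===== PORT A =====
-- A's while loop: scan left to right, break when s[i] == c, count 'a' otherwise; -1 if never found.
def count_a_go (l : List Char) (c : String) (a : Int) : Int :=
  match l with
  | [] => -1
  | t :: rest =>
    if String.mk [t] = c then a
    else count_a_go rest c (if t = 'a' then a + 1 else a)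

def count_a (s : String) (c : String) : Int :=
  count_a_go s.toList c 0

-- ===== PORT B =====
-- locate pass (next(enumerate…)) then count of 'a' over the slice s[:idx]
def count_a_alt (s : String) (c : String) : Int :=
  match s.toList.findIdx? (fun t => String.mk [t] = c) with
  | none => -1
  | some i => ((s.toList.take i).count 'a' : Int)

-- ===== PRECONDITION & SPEC =====
def Spec_count_a (s : String) (c : String) (out : Int) : Prop := out = count_a_alt s c
instance (s : String) (c : String) (out : Int) : Decidable (Spec_count_a s c out) := by unfold Spec_count_a; infer_instance

-- ===== CLAIM (what is proved, stated in full; the proofs are below) =====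
def Claim_equal_count_a : Prop := ∀ (s : String) (c : String), Dom_count_a s c → Spec_count_a s c (count_a s c)

-- ===== LEMMAS AND PROOFS =====
theorem count_a_go_eq (l : List Char) (c : String) (a : Int) :
    count_a_go l c a =
      (match l.findIdx? (fun t => String.mk [t] = c) with
       | none => -1
       | some i => a + ((l.take i).count 'a' : Int)) := by
  induction l generalizing a with
  | nil => simp [count_a_go]
  | cons t rest ih =>
    by_cases h : String.mk [t] = c
    · simp [count_a_go, h, List.findIdx?_cons]
    · simp only [count_a_go, h, if_false, ih, List.findIdx?_cons, decide_eq_true_eq]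
      cases hr : rest.findIdx? (fun t => String.mk [t] = c) with
      | none => simp
      | some i =>
        simp only [Option.map_some]
        by_cases ha : t = 'a' <;> simp [ha, List.count_cons] <;> push_cast <;> ring

-- ===== VERDICT (by name: the statement is the Claim_ definition above) =====
theorem count_a_spec : Claim_equal_count_a := by
  intro s c _
  unfold Spec_count_a count_a count_a_alt
  rw [count_a_go_eq]
  cases s.toList.findIdx? (fun t => String.mk [t] = c) <;> simp
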